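-- pv_equiv track=rewrite | github.com/Kawser-nerd/CLCDSA | Source Codes/CodeJamData/13/44/0.py | solve_min
-- ===== SOURCE A (Python) =====
-- def solve_min(b, m, s, t):
--     assert 0 <= s and s <= t and t < m
--     b %= m
--     if b == 0 or s == 0:
--         return 0
--     elif b * 2 > m:
--         return solve_min(m - b, m, m - t, m - s)
--     else:
--         # Can't necessarily set y = ceil(floor(a*s/m) * m/a), because it might
--         # be less than s. So treat y = s as a special case
--         best = (b * s) % m
--
--         zs = b * s // m + 1
--         zt = b * t // m
--         if (zs <= zt):
--             best = min(best, solve_min(-m, b, zs, zt))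
--         return best
-- ===== SOURCE B (Python) =====
-- def solve_min(b, m, s, t):
--     # Direct definition: scan the range and keep the smallest residue.
--     assert 0 <= s and s <= t and t < m
--     best = (b * s) % m
--     for x in range(s + 1, t + 1):
--         r = (b * x) % m
--         if r < best:
--             best = r
--     return best
-- ===== Notes on version B (the rewrite author's own statement) =====
-- stated objective: simpler
-- what changed: Replaces the Euclidean-chain recursion by the direct definition of the result: a single linear scan of x in [s,t] keeping the smallest (b*x) % m; B is O(t-s) instead of A's O(log m), so it is simpler but slower on huge ranges.
import Mathlib
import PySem

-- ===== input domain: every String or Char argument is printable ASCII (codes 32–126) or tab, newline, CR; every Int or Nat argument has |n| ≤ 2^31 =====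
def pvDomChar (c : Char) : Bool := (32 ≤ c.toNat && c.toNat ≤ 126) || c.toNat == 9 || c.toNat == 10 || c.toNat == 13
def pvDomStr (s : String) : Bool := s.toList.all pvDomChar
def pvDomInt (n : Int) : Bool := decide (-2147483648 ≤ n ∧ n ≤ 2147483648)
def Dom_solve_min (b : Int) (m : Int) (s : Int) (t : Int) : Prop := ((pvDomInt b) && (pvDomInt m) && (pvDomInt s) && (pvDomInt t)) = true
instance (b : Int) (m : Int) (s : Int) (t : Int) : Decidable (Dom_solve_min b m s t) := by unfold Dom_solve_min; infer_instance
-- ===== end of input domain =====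

-- B replaces A's Euclidean-chain recursion by the direct definition — a linear scan of
-- x in [s,t] keeping the smallest (b*x) % m (objective: simpler; slower on huge ranges).


-- ===== PORT A =====
-- Literal port of A's recursion; the `if _h : …` guard is Python's `assert`
-- (outside it A raises AssertionError, so nothing is claimed there: see Pre_).
def solve_min (b : Int) (m : Int) (s : Int) (t : Int) : Int :=
  if _h : 0 ≤ s ∧ s ≤ t ∧ t < m then
    if PySem.Int.mod b m = 0 ∨ s = 0 then 0
    else if PySem.Int.mod b m * 2 > m then
      solve_min (m - PySem.Int.mod b m) m (m - t) (m - s)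
    else
      if PySem.Int.floordiv (PySem.Int.mod b m * s) m + 1 ≤ PySem.Int.floordiv (PySem.Int.mod b m * t) m then
        min (PySem.Int.mod (PySem.Int.mod b m * s) m)
            (solve_min (-m) (PySem.Int.mod b m)
              (PySem.Int.floordiv (PySem.Int.mod b m * s) m + 1)
              (PySem.Int.floordiv (PySem.Int.mod b m * t) m))
      else PySem.Int.mod (PySem.Int.mod b m * s) m
  else 0
termination_by (2 * m + PySem.Int.mod b m).toNat
decreasing_by
  · -- flip step: (m - b%m, m, m - t, m - s)
    have hm : (0:Int) < m := by omega
    have h0 : 0 ≤ PySem.Int.mod b m := PySem.Int.mod_nonneg b hm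
    have h1 : PySem.Int.mod b m < m := PySem.Int.mod_lt b hm
    have : PySem.Int.mod (m - PySem.Int.mod b m) m = m - PySem.Int.mod b m := by
      rw [PySem.Int.mod_eq_emod_of_pos hm]
      exact Int.emod_eq_of_lt (by omega) (by omega)
    rw [this]; omega
  · -- descent step: (-m, b%m, zs, zt)
    have hm : (0:Int) < m := by omega
    have h0 : 0 ≤ PySem.Int.mod b m := PySem.Int.mod_nonneg b hm
    have h1 : PySem.Int.mod b m < m := PySem.Int.mod_lt b hm
    have hb : (0:Int) < PySem.Int.mod b m := by
      rcases _h with ⟨hs, hst, htm⟩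
      simp only [not_or] at *; omega
    have h2 : 0 ≤ PySem.Int.mod (-m) (PySem.Int.mod b m) := PySem.Int.mod_nonneg _ hb
    have h3 : PySem.Int.mod (-m) (PySem.Int.mod b m) < PySem.Int.mod b m := PySem.Int.mod_lt _ hb
    omega

-- ===== PORT B =====
-- Port of Source B: the same `assert`, then a linear scan — a foldl over
-- range(s+1, t+1) starting from (b*s) % m that keeps the smaller residue.
def solve_min_alt (b : Int) (m : Int) (s : Int) (t : Int) : Int :=
  if 0 ≤ s ∧ s ≤ t ∧ t < m then
    (PySem.List.pyRange (s + 1) (t + 1) 1).foldl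
      (fun best x => if PySem.Int.mod (b * x) m < best then PySem.Int.mod (b * x) m else best)
      (PySem.Int.mod (b * s) m)
  else 0

-- ===== PRECONDITION & SPEC =====
-- Pre_ is exactly Python A's `assert 0 <= s and s <= t and t < m`; outside it A
-- (and B, which keeps the assert) raises AssertionError, so those inputs are excluded.
def Pre_solve_min (b : Int) (m : Int) (s : Int) (t : Int) : Prop :=
  0 ≤ s ∧ s ≤ t ∧ t < m
instance (b : Int) (m : Int) (s : Int) (t : Int) : Decidable (Pre_solve_min b m s t) := by unfold Pre_solve_min; infer_instance
def pvWitness_solve_min : Int × Int × Int × Int := (3, 7, 1, 4)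

def Spec_solve_min (b : Int) (m : Int) (s : Int) (t : Int) (out : Int) : Prop := out = solve_min_alt b m s t
instance (b : Int) (m : Int) (s : Int) (t : Int) (out : Int) : Decidable (Spec_solve_min b m s t out) := by unfold Spec_solve_min; infer_instance

-- ===== CLAIM (what is proved, stated in full; the proofs are below) =====
def Claim_equal_solve_min : Prop := ∀ (b : Int) (m : Int) (s : Int) (t : Int), Dom_solve_min b m s t → Pre_solve_min b m s t → Spec_solve_min b m s t (solve_min b m s t)

-- ===== LEMMAS AND PROOFS =====

-- `pvIsMin b m s t v`: v is the least value of (b*x) % m over x ∈ [s,t].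
-- Both ports are shown to satisfy it; it determines v uniquely.
def pvIsMin (b m s t v : Int) : Prop :=
  (∃ x, s ≤ x ∧ x ≤ t ∧ (b * x) % m = v) ∧ ∀ x, s ≤ x → x ≤ t → v ≤ (b * x) % m

theorem pvIsMin_unique {b m s t v w : Int} (hv : pvIsMin b m s t v) (hw : pvIsMin b m s t w) :
    v = w := by
  obtain ⟨⟨x, hx1, hx2, hx3⟩, hlv⟩ := hv
  obtain ⟨⟨y, hy1, hy2, hy3⟩, hlw⟩ := hw
  have h1 := hlv y hy1 hy2
  have h2 := hlw x hx1 hx2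
  omega

-- modular congruence used by A's reduction b %= m
theorem pvmod_mul (b m x : Int) : (b % m * x) % m = (b * x) % m := by
  conv_lhs => rw [Int.mul_emod, Int.emod_emod_of_dvd _ dvd_rfl, ← Int.mul_emod]

-- modular congruence behind A's flip step
theorem pvflip (b m x : Int) :
    ((m - b % m) * (m - x)) % m = (b * x) % m := by
  have h : (m - b % m) * (m - x) = b % m * x + m * (m - x - b % m) := by ring
  rw [h, Int.add_mul_emod_self_left, pvmod_mul]

-- a nonnegative integer dominates its remainder
theorem pvemod_le (w a : Int) (hw : 0 ≤ w) (ha : 0 < a) : w % a ≤ w := by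
  rcases lt_or_ge w a with h | h
  · rw [Int.emod_eq_of_lt hw h]
  · have h1 : w % a < a := Int.emod_lt_of_pos w ha
    omega

-- A computes the least residue over [s,t]
theorem solve_min_isMin (b m s t : Int) (h : 0 ≤ s ∧ s ≤ t ∧ t < m) :
    pvIsMin b m s t (solve_min b m s t) := by
  fun_induction solve_min b m s t with
  | case1 b m s t hpre hterm =>
      have hm : (0:Int) < m := by omega
      refine ⟨?_, fun x _ _ => Int.emod_nonneg _ (by omega)⟩
      rcases hterm with hb0 | hs0
      · refine ⟨s, le_refl _, hpre.2.1, ?_⟩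
        rw [PySem.Int.mod_eq_emod_of_pos hm] at hb0
        have hdvd : m ∣ b := Int.dvd_of_emod_eq_zero hb0
        exact Int.emod_eq_zero_of_dvd (hdvd.mul_right s)
      · subst hs0
        exact ⟨0, le_refl _, hpre.2.1, by simp⟩
  | case2 b m s t hpre hterm hflip ih =>
      have hm : (0:Int) < m := by omega
      simp only [not_or] at hterm
      have hP2 : 0 ≤ m - t ∧ m - t ≤ m - s ∧ m - s < m := by omega
      obtain ⟨⟨y, hy1, hy2, hyv⟩, hlow⟩ := ih hP2
      simp only [PySem.Int.mod_eq_emod_of_pos hm] at hyv hlow ⊢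
      constructor
      · refine ⟨m - y, by omega, by omega, ?_⟩
        rw [← pvflip b m (m - y), show m - (m - y) = y by ring]
        exact hyv
      · intro x hx1 hx2
        have h1 := hlow (m - x) (by omega) (by omega)
        rwa [pvflip b m x] at h1
  | case3 b m s t hpre hterm hflip hz ih =>
      have hm : (0:Int) < m := by omega
      simp only [not_or] at hterm
      obtain ⟨hbne, hsne⟩ := hterm
      simp only [PySem.Int.mod_eq_emod_of_pos hm, PySem.Int.floordiv_eq_ediv_of_pos hm]
        at hbne hflip hz ih ⊢
      have ha0 : 0 < b % m := by
        have := Int.emod_nonneg b (by omega : m ≠ 0); omega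
      have haLt : b % m < m := Int.emod_lt_of_pos b hm
      have h2a : b % m * 2 ≤ m := by omega
      have hs1 : 1 ≤ s := by omega
      have hzs0 : 0 ≤ (b % m * s) / m := Int.ediv_nonneg (by positivity) (le_of_lt hm)
      have hzta : (b % m * t) / m < b % m := by
        rw [Int.ediv_lt_iff_lt_mul hm]
        have : b % m * t < b % m * m := by
          apply mul_lt_mul_of_pos_left (by omega) ha0
        linarith
      obtain ⟨⟨z, hz1, hz2, hzv⟩, hlowz⟩ := ih ⟨by omega, hz, hzta⟩
      have hv0 : 0 ≤ solve_min (-m) (b % m) (b % m * s / m + 1) (b % m * t / m) := by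
        rw [← hzv]; exact Int.emod_nonneg _ (by omega)
      have hva : solve_min (-m) (b % m) (b % m * s / m + 1) (b % m * t / m) < b % m := by
        rw [← hzv]; exact Int.emod_lt_of_pos _ ha0
      set v := solve_min (-m) (b % m) (b % m * s / m + 1) (b % m * t / m) with hvdef
      have hes := Int.emod_def (b % m * s) m
      have hes0 : 0 ≤ (b % m * s) % m := Int.emod_nonneg _ (by omega)
      have hesm : (b % m * s) % m < m := Int.emod_lt_of_pos _ hm
      have het := Int.emod_def (b % m * t) m
      have het0 : 0 ≤ (b % m * t) % m := Int.emod_nonneg _ (by omega)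
      constructor
      · rcases le_total ((b % m * s) % m) v with hle | hle
        · rw [min_eq_left hle]
          exact ⟨s, le_refl _, hpre.2.1, (pvmod_mul b m s).symm⟩
        · rw [min_eq_right hle]
          have hq := Int.mul_ediv_add_emod (-m * z) (b % m)
          rw [hzv] at hq
          set x := -((-m * z) / (b % m)) with hxdef
          have hax : b % m * x = m * z + v := by
            have : b % m * x = -(b % m * ((-m * z) / (b % m))) := by rw [hxdef]; ring
            rw [this]; linarith
          have hmzs : m * (b % m * s / m + 1) = m * (b % m * s / m) + m := by ring
          have hsx : s < x := by
            have h2 : b % m * s < m * (b % m * s / m + 1) := by omega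
            have h3 : m * (b % m * s / m + 1) ≤ m * z := by
              apply mul_le_mul_of_nonneg_left hz1 (le_of_lt hm)
            have h4 : b % m * s < b % m * x := by omega
            exact lt_of_mul_lt_mul_left h4 (le_of_lt ha0)
          have hxt : x ≤ t := by
            have h5 : m * (b % m * t / m) ≤ b % m * t := by omega
            have h6 : m * z ≤ m * (b % m * t / m) := by
              apply mul_le_mul_of_nonneg_left hz2 (le_of_lt hm)
            have hw0 : 0 ≤ b % m * t - m * z := by omega
            have hwm : (b % m * t - m * z) % (b % m) = v := by
              rw [show b % m * t - m * z = -(m * z) + b % m * t by ring,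
                Int.add_mul_emod_self_left, show -(m * z) = -m * z by ring, hzv]
            have h7 : v ≤ b % m * t - m * z := by
              rw [← hwm]; exact pvemod_le _ _ hw0 ha0
            have h8 : b % m * x ≤ b % m * t := by omega
            exact le_of_mul_le_mul_left h8 ha0
          refine ⟨x, le_of_lt hsx, hxt, ?_⟩
          rw [← pvmod_mul b m x, hax, show m * z + v = v + m * z by ring,
            Int.add_mul_emod_self_left, Int.emod_eq_of_lt hv0 (by omega)]
      · intro x hx1 hx2
        rw [← pvmod_mul b m x]
        have hex := Int.emod_def (b % m * x) m
        have hex0 : 0 ≤ (b % m * x) % m := Int.emod_nonneg _ (by omega)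
        have hz'0 : b % m * s / m ≤ b % m * x / m :=
          Int.ediv_le_ediv hm (mul_le_mul_of_nonneg_left hx1 (le_of_lt ha0))
        have hz't : b % m * x / m ≤ b % m * t / m :=
          Int.ediv_le_ediv hm (mul_le_mul_of_nonneg_left hx2 (le_of_lt ha0))
        by_cases hcase : b % m * x / m ≤ b % m * s / m
        · have hzz : b % m * x / m = b % m * s / m := le_antisymm hcase hz'0
          have hsx : b % m * s ≤ b % m * x := mul_le_mul_of_nonneg_left hx1 (le_of_lt ha0)
          have h1 : (b % m * s) % m ≤ (b % m * x) % m := by rw [hes, hex, hzz]; omega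
          exact le_trans (min_le_left _ _) h1
        · have h2 := hlowz (b % m * x / m) (by omega) hz't
          have h3 : (-m * (b % m * x / m)) % (b % m) ≤ (b % m * x) % m := by
            have hcong : ((b % m * x) % m) % (b % m) = (-m * (b % m * x / m)) % (b % m) := by
              rw [hex, show b % m * x - m * (b % m * x / m)
                  = -(m * (b % m * x / m)) + b % m * x by ring,
                Int.add_mul_emod_self_left, show -(m * (b % m * x / m))
                  = -m * (b % m * x / m) by ring]
            rw [← hcong]
            exact pvemod_le _ _ hex0 ha0
          exact le_trans (min_le_right _ _) (le_trans h2 h3)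
  | case4 b m s t hpre hterm hflip hz =>
      have hm : (0:Int) < m := by omega
      simp only [not_or] at hterm
      obtain ⟨hbne, hsne⟩ := hterm
      simp only [PySem.Int.mod_eq_emod_of_pos hm, PySem.Int.floordiv_eq_ediv_of_pos hm]
        at hbne hflip hz ⊢
      have ha0 : 0 < b % m := by
        have := Int.emod_nonneg b (by omega : m ≠ 0); omega
      have hes := Int.emod_def (b % m * s) m
      constructor
      · exact ⟨s, le_refl _, hpre.2.1, (pvmod_mul b m s).symm⟩
      · intro x hx1 hx2
        rw [← pvmod_mul b m x]
        have hex := Int.emod_def (b % m * x) m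
        have hz'0 : b % m * s / m ≤ b % m * x / m :=
          Int.ediv_le_ediv hm (mul_le_mul_of_nonneg_left hx1 (le_of_lt ha0))
        have hz't : b % m * x / m ≤ b % m * t / m :=
          Int.ediv_le_ediv hm (mul_le_mul_of_nonneg_left hx2 (le_of_lt ha0))
        have hzz : b % m * x / m = b % m * s / m := by omega
        have hsx : b % m * s ≤ b % m * x := mul_le_mul_of_nonneg_left hx1 (le_of_lt ha0)
        rw [hes, hex, hzz]; omega
  | case5 b m s t hpre => exact absurd h hpre

-- extending the scanned range by one element
theorem pvIsMin_extend {b m s t v : Int} (hv : pvIsMin b m s t v) :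
    pvIsMin b m s (t + 1) (if (b * (t + 1)) % m < v then (b * (t + 1)) % m else v) := by
  obtain ⟨⟨x, hx1, hx2, hx3⟩, hlow⟩ := hv
  by_cases hc : (b * (t + 1)) % m < v
  · rw [if_pos hc]
    refine ⟨⟨t + 1, by omega, le_refl _, rfl⟩, ?_⟩
    intro y hy1 hy2
    by_cases hy : y ≤ t
    · exact le_of_lt (lt_of_lt_of_le hc (hlow y hy1 hy))
    · have hyt : y = t + 1 := by omega
      subst hyt; exact le_refl _
  · rw [if_neg hc]
    refine ⟨⟨x, hx1, by omega, hx3⟩, ?_⟩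
    intro y hy1 hy2
    by_cases hy : y ≤ t
    · exact hlow y hy1 hy
    · have hyt : y = t + 1 := by omega
      subst hyt; omega

-- B's fold computes the least residue over [s, s+n]
theorem alt_fold_isMin (b m s : Int) (hm : 0 < m) (n : Nat) :
    pvIsMin b m s (s + n)
      ((PySem.List.pyRange (s + 1) (s + n + 1) 1).foldl
        (fun best x => if PySem.Int.mod (b * x) m < best then PySem.Int.mod (b * x) m else best)
        (PySem.Int.mod (b * s) m)) := by
  induction n with
  | zero =>
    have hr : PySem.List.pyRange (s + (0:Nat) + 1) (s + (0:Nat) + 1) 1 = [] := by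
      rw [PySem.List.pyRange_one]; simp
    simp only [Nat.cast_zero, add_zero] at *
    have hr' : PySem.List.pyRange (s + 1) (s + 1) 1 = [] := by
      rw [PySem.List.pyRange_one]; simp
    rw [hr', List.foldl_nil, PySem.Int.mod_eq_emod_of_pos hm]
    refine ⟨⟨s, le_refl _, le_refl _, rfl⟩, ?_⟩
    intro x h1 h2
    have hx : x = s := by omega
    subst hx; exact le_refl _
  | succ n ih =>
    have hr : PySem.List.pyRange (s + 1) (s + ((n:Nat) + 1 : Nat) + 1) 1
        = PySem.List.pyRange (s + 1) (s + (n:Nat) + 1) 1 ++ [s + (n:Int) + 1] := by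
      rw [PySem.List.pyRange_one, PySem.List.pyRange_one]
      have h1 : ((s + ((n:Nat) + 1 : Nat) + 1) - (s + 1)).toNat = n + 1 := by omega
      have h2 : ((s + (n:Nat) + 1) - (s + 1)).toNat = n := by omega
      rw [h1, h2, List.range_succ, List.map_append]
      simp; ring
    rw [hr, List.foldl_append, List.foldl_cons, List.foldl_nil]
    have h := pvIsMin_extend (t := s + (n:Int)) ih
    rw [PySem.Int.mod_eq_emod_of_pos hm]
    have harg : s + ((n:Nat) + 1 : Nat) = s + (n:Int) + 1 := by push_cast; ring
    rw [harg]
    convert h using 3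

-- ===== VERDICT (by name: the statement is the Claim_ definition above) =====
theorem solve_min_spec : Claim_equal_solve_min := by
  intro b m s t _hD hP
  unfold Spec_solve_min
  have hP' : 0 ≤ s ∧ s ≤ t ∧ t < m := hP
  have hm : (0:Int) < m := by omega
  have hB : pvIsMin b m s t (solve_min_alt b m s t) := by
    unfold solve_min_alt
    obtain ⟨n, hn⟩ : ∃ n : Nat, t = s + (n : Int) := ⟨(t - s).toNat, by omega⟩
    subst hn
    rw [if_pos hP']
    exact alt_fold_isMin b m s hm n
  exact pvIsMin_unique (solve_min_isMin b m s t hP') hB
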